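-- pv_equiv track=rewrite | github.com/galaxyproject/total-perspective-vortex | tpv/core/entities.py | merge_env_list
-- ===== SOURCE A (Python) =====
-- def merge_env_list(original, replace):
--     for i, original_elem in enumerate(original):
--         for j, replace_elem in enumerate(replace):
--             if (("name" in replace_elem and original_elem.get("name") == replace_elem["name"])
--                     or original_elem == replace_elem):
--                 original[i] = replace.pop(j)
--                 break
--     original.extend(replace)
--     return original
-- ===== SOURCE B (Python) =====
-- def merge_env_list(original, replace):
--     # Note: A mutates both arguments in place; B is pure — the equivalence claimed is about the return value.
--     def cls(d):
--         return d["name"] if "name" in d else frozenset(d.items())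
--     queues = {}
--     for j, r in enumerate(replace):
--         queues.setdefault(cls(r), []).append((j, r))
--     consumed = set()
--     result = []
--     for o in original:
--         q = queues.get(cls(o))
--         if q:
--             j, r = q.pop(0)
--             consumed.add(j)
--             result.append(r)
--         else:
--             result.append(o)
--     result.extend(r for j, r in enumerate(replace) if j not in consumed)
--     return result
-- ===== Notes on version B (the rewrite author's own statement) =====
-- stated objective: alternative
-- what changed: A rescans the whole (shrinking) replace list for every original element; B instead builds, in one pass, a dict of FIFO queues keyed by name (or by frozenset(items) for nameless entries), then does a single pass over original popping the front of the matching queue, tracking consumed indices for the final extend; it trades A's nested scans for the index dict and a consumed set.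
import Mathlib
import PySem

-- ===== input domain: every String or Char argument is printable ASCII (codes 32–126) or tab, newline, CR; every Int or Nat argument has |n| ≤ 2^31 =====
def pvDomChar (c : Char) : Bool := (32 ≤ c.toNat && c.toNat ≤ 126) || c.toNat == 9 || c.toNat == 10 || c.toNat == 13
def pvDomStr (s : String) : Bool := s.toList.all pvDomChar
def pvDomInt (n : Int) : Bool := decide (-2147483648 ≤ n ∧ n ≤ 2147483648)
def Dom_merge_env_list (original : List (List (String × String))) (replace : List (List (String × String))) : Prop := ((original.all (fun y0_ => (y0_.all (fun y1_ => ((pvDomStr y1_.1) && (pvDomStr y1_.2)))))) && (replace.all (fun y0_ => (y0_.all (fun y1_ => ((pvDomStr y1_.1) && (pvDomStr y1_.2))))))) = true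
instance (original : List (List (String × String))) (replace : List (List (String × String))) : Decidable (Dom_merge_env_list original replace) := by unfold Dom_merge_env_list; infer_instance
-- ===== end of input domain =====

-- B replaces A's per-element rescans of `replace` by one dict of FIFO queues (keyed by name, or
-- by the item set for nameless entries) built in a single pass, plus a consumed-index set;
-- return-value equivalence only: A mutates both arguments in place, B is pure.

-- ===== PORT A =====

-- d.get(k) / d[k] on a Python dict represented as its item list (unique keys under Pre_)
def lkA : List (String × String) → String → Option String
  | [], _ => none
  | p :: t, s => if p.1 == s then some p.2 else lkA t s

-- Python `==` on two dicts: equal as mappings (exact for unique-key item lists)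
def dictEqB (a b : List (String × String)) : Bool :=
  (a.all fun p => lkA b p.1 == some p.2) && (b.all fun p => lkA a p.1 == some p.2)

-- the inner `if` condition of A
def condA (o r : List (String × String)) : Bool :=
  (match lkA r "name" with
   | some v => lkA o "name" == some v
   | none => false) || dictEqB o r

-- A's inner loop: first j with the condition; returns (replace.pop(j), remaining replace)
def popFirst (o : List (String × String)) :
    List (List (String × String)) → Option (List (String × String) × List (List (String × String)))
  | [] => none
  | r :: rs =>
    if condA o r then some (r, rs)
    else match popFirst o rs with
         | none => none
         | some x => some (x.1, r :: x.2)

-- A's outer loop: state = (rewritten original prefix, current replace)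
def outerA : List (List (String × String)) → List (List (String × String)) →
    List (List (String × String)) × List (List (String × String))
  | [], repl => ([], repl)
  | o :: os, repl =>
    match popFirst o repl with
    | none => let p := outerA os repl; (o :: p.1, p.2)
    | some x => let p := outerA os x.2; (x.1 :: p.1, p.2)

def merge_env_list (original : List (List (String × String))) (replace : List (List (String × String))) : List (List (String × String)) :=
  let p := outerA original replace
  p.1 ++ p.2

-- ===== PORT B =====

-- frozenset(d.items()) canonical form: items sorted by key (unique keys under Pre_)
def canonB (d : List (String × String)) : List (String × String) :=
  PySem.List.sorted d (fun p => p.1) false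

-- Source B's cls(d): d["name"] if present, else frozenset(d.items()); encoded as a pair
def clsB (d : List (String × String)) : Option String × List (String × String) :=
  match lkA d "name" with
  | some n => (some n, [])
  | none => (none, canonB d)

-- queues.setdefault(cls(r), []).append((j, r)) over enumerate(replace)
def buildQ (repl : List (List (String × String))) :
    PySem.Dict (Option String × List (String × String)) (List (Int × List (String × String))) :=
  (PySem.List.enumerate repl).foldl
    (fun d jr => d.modify (clsB jr.2) [] (fun q => q ++ [jr])) PySem.Dict.empty

-- the main pass over original: pop the front of the matching queue, else keep the element
def bloop : List (List (String × String)) →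
    PySem.Dict (Option String × List (String × String)) (List (Int × List (String × String))) →
    PySem.Set Int → List (List (String × String)) →
    List (List (String × String)) × PySem.Set Int
  | [], _, consumed, result => (result, consumed)
  | o :: os, queues, consumed, result =>
    match (queues.getD (clsB o) []).head? with
    | some jr => bloop os (queues.insert (clsB o) (queues.getD (clsB o) []).tail)
                   (PySem.Set.add consumed jr.1) (result ++ [jr.2])
    | none => bloop os queues consumed (result ++ [o])

def merge_env_list_alt (original : List (List (String × String))) (replace : List (List (String × String))) : List (List (String × String)) :=
  let queues := buildQ replace
  let p := bloop original queues PySem.Set.empty []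
  p.1 ++ ((PySem.List.enumerate replace).filter
            (fun jr => !(PySem.Set.contains p.2 jr.1))).map (fun jr => jr.2)

-- ===== PRECONDITION & SPEC =====
-- Pre_ excludes item lists with a repeated key inside one dict: such a list does not represent
-- any Python dict (A's inputs are dicts, whose keys are always unique), so A's `==`/get have no
-- counterpart on them.
def Pre_merge_env_list (original : List (List (String × String))) (replace : List (List (String × String))) : Prop :=
  (∀ d ∈ original, (d.map Prod.fst).Nodup) ∧ (∀ d ∈ replace, (d.map Prod.fst).Nodup)
instance (original : List (List (String × String))) (replace : List (List (String × String))) : Decidable (Pre_merge_env_list original replace) := by unfold Pre_merge_env_list; infer_instance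

def pvWitness_merge_env_list : (List (List (String × String))) × (List (List (String × String))) :=
  ([[("name", "a"), ("value", "1")], [("x", "y")]],
   [[("name", "a"), ("value", "2")], [("name", "b")]])

def Spec_merge_env_list (original : List (List (String × String))) (replace : List (List (String × String))) (out : List (List (String × String))) : Prop := out = merge_env_list_alt original replace
instance (original : List (List (String × String))) (replace : List (List (String × String))) (out : List (List (String × String))) : Decidable (Spec_merge_env_list original replace out) := by unfold Spec_merge_env_list; infer_instance

-- ===== CLAIM (what is proved, stated in full; the proofs are below) =====
def Claim_equal_merge_env_list : Prop := ∀ (original : List (List (String × String))) (replace : List (List (String × String))), Dom_merge_env_list original replace → Pre_merge_env_list original replace → Spec_merge_env_list original replace (merge_env_list original replace)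

-- ===== LEMMAS AND PROOFS =====

-- `d` has unique keys
def nkeys (d : List (String × String)) : Prop := (d.map Prod.fst).Nodup

-- live part of enumerate(replace): the not-yet-consumed pairs
def liveL (replace : List (List (String × String))) (C : PySem.Set Int) : List (Int × List (String × String)) :=
  (PySem.List.enumerate replace).filter (fun jr => !(PySem.Set.contains C jr.1))

-- reference recursion: A's outer loop on the annotated live list
def extractF {α : Type} (p : α → Bool) : List α → Option (α × List α)
  | [] => none
  | x :: xs =>
    if p x then some (x, xs)
    else match extractF p xs with
         | none => none
         | some r => some (r.1, x :: r.2)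

def refA : List (List (String × String)) → List (Int × List (String × String)) →
    List (List (String × String)) × List (Int × List (String × String))
  | [], l => ([], l)
  | o :: os, l =>
    match extractF (fun p => condA o p.2) l with
    | none => let r := refA os l; (o :: r.1, r.2)
    | some e => let r := refA os e.2; (e.1.2 :: r.1, r.2)

-- ---- lookup lemmas ----
lemma lkA_mem {d : List (String × String)} {k : String} {v : String} (h : lkA d k = some v) : (k, v) ∈ d := by
  induction d with
  | nil => simp [lkA] at h
  | cons p t ih =>
    rw [lkA] at h
    split at h
    · rename_i hp
      obtain rfl : p.2 = v := by simpa using h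
      obtain rfl : p.1 = k := by simpa using hp
      simp
    · exact List.mem_cons_of_mem _ (ih h)

lemma mem_lkA {d : List (String × String)} {k v : String} (hd : nkeys d) (h : (k, v) ∈ d) : lkA d k = some v := by
  induction d with
  | nil => simp at h
  | cons p t ih =>
    unfold nkeys at hd
    rw [List.map_cons, List.nodup_cons] at hd
    rcases List.mem_cons.mp h with hh | ht
    · rw [lkA, ← hh]
      simp
    · have hne : ¬ (p.1 == k) = true := by
        intro hb
        have : p.1 = k := by simpa using hb
        exact hd.1 (this ▸ List.mem_map.mpr ⟨(k, v), ht, rfl⟩)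
      rw [lkA, if_neg hne]
      exact ih hd.2 ht

lemma dictEqB_iff {o r : List (String × String)} (ho : nkeys o) (hr : nkeys r) :
    dictEqB o r = true ↔ o.Perm r := by
  constructor
  · intro h
    rw [dictEqB, Bool.and_eq_true, List.all_eq_true, List.all_eq_true] at h
    obtain ⟨h1, h2⟩ := h
    rw [List.perm_ext_iff_of_nodup (List.Nodup.of_map _ ho) (List.Nodup.of_map _ hr)]
    intro a
    constructor
    · intro ha
      have := lkA_mem (v := a.2) (by simpa using h1 a ha)
      simpa using this
    · intro ha
      have := lkA_mem (v := a.2) (by simpa using h2 a ha)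
      simpa using this
  · intro h
    rw [dictEqB, Bool.and_eq_true, List.all_eq_true, List.all_eq_true]
    constructor
    · intro p hp
      have : p ∈ r := h.mem_iff.mp hp
      simpa using mem_lkA hr (by simpa using this)
    · intro p hp
      have : p ∈ o := h.mem_iff.mpr hp
      simpa using mem_lkA ho (by simpa using this)

lemma canonB_eq_of_perm {o r : List (String × String)} (ho : nkeys o) (h : o.Perm r) :
    canonB o = canonB r := by
  have hperm : (canonB o).Perm r := (PySem.List.sorted_perm o _ false).trans h
  have hco : (canonB o).Perm o := PySem.List.sorted_perm o _ false
  have h2 : ((canonB o).map Prod.fst).Nodup := ((hco.map Prod.fst).nodup_iff).mpr ho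
  have h2' : (canonB o).Pairwise (fun a b => a.1 ≠ b.1) := List.pairwise_map.mp h2
  have h1 : (canonB o).Pairwise (fun a b => a.1 ≤ b.1) :=
    PySem.List.sorted_pairwise o (fun p => p.1)
  have hpw : (canonB o).Pairwise (fun a b => a.1 < b.1) :=
    (h1.and h2').imp (fun hab => lt_of_le_of_ne hab.1 hab.2)
  exact (PySem.List.sorted_eq_of_perm_of_pairwise_lt r (canonB o) (fun p => p.1) hperm hpw).symm

-- a perm between unique-key dicts maps "name" lookups to each other
lemma perm_name {o r : List (String × String)} (ho : nkeys o) (h : o.Perm r) {n : String}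
    (hn : lkA r "name" = some n) : lkA o "name" = some n :=
  mem_lkA ho (h.mem_iff.mpr (lkA_mem hn))

lemma cond_char {o r : List (String × String)} (ho : nkeys o) (hr : nkeys r) :
    condA o r = decide (clsB r = clsB o) := by
  rcases h1 : lkA o "name" with _ | n <;> rcases h2 : lkA r "name" with _ | m
  · -- both nameless: dict equality ↔ canonical forms equal
    rw [condA, h1, h2]
    simp only [clsB, h1, h2, Bool.false_or]
    by_cases hp : canonB r = canonB o
    · have hperm : o.Perm r := by
        have : o.Perm (canonB o) := (PySem.List.sorted_perm o _ false).symm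
        exact (this.trans (hp.symm ▸ (PySem.List.sorted_perm r _ false)))
      simp [hp, (dictEqB_iff ho hr).mpr hperm]
    · have : dictEqB o r = false := by
        cases hb : dictEqB o r
        · rfl
        · exact absurd (canonB_eq_of_perm hr ((dictEqB_iff ho hr).mp hb).symm) hp
      simp [this, hp]
  · -- o nameless, r named: no match possible
    rw [condA, h1, h2]
    have : dictEqB o r = false := by
      cases hb : dictEqB o r
      · rfl
      · have := perm_name ho ((dictEqB_iff ho hr).mp hb) h2
        rw [h1] at this; cases this
    simp [clsB, h1, h2, this]
  · -- o named, r nameless: no match possible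
    rw [condA, h1, h2]
    have : dictEqB o r = false := by
      cases hb : dictEqB o r
      · rfl
      · have := perm_name hr ((dictEqB_iff ho hr).mp hb).symm h1
        rw [h2] at this; cases this
    simp [clsB, h1, h2, this]
  · -- both named: names decide
    rw [condA, h1, h2]
    by_cases hnm : m = n
    · simp [clsB, h1, h2, hnm]
    · have : dictEqB o r = false := by
        cases hb : dictEqB o r
        · rfl
        · have := perm_name ho ((dictEqB_iff ho hr).mp hb) h2
          rw [h1] at this
          exact absurd (by simpa using this.symm) hnm
      simp [clsB, h1, h2, this, hnm, Ne.symm hnm]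

-- ---- extract lemmas ----
lemma extractF_none {α : Type} (p : α → Bool) (l : List α) (h : ∀ x ∈ l, p x = false) :
    extractF p l = none := by
  induction l with
  | nil => rfl
  | cons x xs ih =>
    rw [extractF, if_neg (by simp [h x (by simp)]), ih (fun y hy => h y (by simp [hy]))]

lemma extractF_of_split {α : Type} (p : α → Bool) (pre : List α) (e : α) (suf : List α)
    (hpre : ∀ x ∈ pre, p x = false) (he : p e = true) :
    extractF p (pre ++ e :: suf) = some (e, pre ++ suf) := by
  induction pre with
  | nil => simp [extractF, he]
  | cons x xs ih =>
    rw [List.cons_append, extractF, if_neg (by simp [hpre x (by simp)]),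
      ih (fun y hy => hpre y (by simp [hy]))]
    simp

lemma filter_eq_cons_split {α : Type} (q : α → Bool) (l : List α) (e : α) (t : List α)
    (h : l.filter q = e :: t) :
    ∃ pre suf, l = pre ++ e :: suf ∧ (∀ x ∈ pre, q x = false) ∧ q e = true ∧ t = suf.filter q := by
  induction l generalizing e t with
  | nil => simp at h
  | cons x xs ih =>
    rw [List.filter_cons] at h
    split at h
    · rename_i hx
      injection h with h1 h2
      subst h1
      exact ⟨[], xs, by simp, by simp, hx, h2.symm⟩
    · rename_i hx
      obtain ⟨pre, suf, rfl, hpre, he, ht⟩ := ih _ _ h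
      exact ⟨x :: pre, suf, by simp, by
        intro y hy
        rcases List.mem_cons.mp hy with rfl | hy
        · simpa using hx
        · exact hpre y hy, he, ht⟩

-- ---- popFirst vs extractF ----
lemma popFirst_map (o : List (String × String)) (l : List (Int × List (String × String))) :
    popFirst o (l.map (fun x => x.2)) =
      (extractF (fun p => condA o p.2) l).map (fun r => (r.1.2, r.2.map (fun x => x.2))) := by
  induction l with
  | nil => rfl
  | cons x xs ih =>
    rw [List.map_cons, popFirst, extractF]
    by_cases hc : condA o x.2
    · simp [hc]
    · rw [if_neg hc, if_neg hc, ih]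
      cases hx : extractF (fun p => condA o p.2) xs <;> simp

lemma outerA_refA (os : List (List (String × String))) (l : List (Int × List (String × String))) :
    outerA os (l.map (fun x => x.2)) = ((refA os l).1, (refA os l).2.map (fun x => x.2)) := by
  induction os generalizing l with
  | nil => simp [outerA, refA]
  | cons o os ih =>
    rw [outerA, popFirst_map, refA]
    cases hx : extractF (fun p => condA o p.2) l with
    | none => simp [ih l]
    | some e => simp [ih e.2]

-- ---- live list lemmas ----
lemma pairwise_live (replace : List (List (String × String))) (C : PySem.Set Int) :
    (liveL replace C).Pairwise (fun a b => a.1 < b.1) :=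
  List.Pairwise.sublist (List.filter_sublist) (PySem.List.pairwise_lt_enumerate replace 0)

lemma mem_live_snd {replace : List (List (String × String))} {C : PySem.Set Int}
    {x : Int × List (String × String)} (h : x ∈ liveL replace C) : x.2 ∈ replace := by
  have := List.mem_of_mem_filter h
  obtain ⟨k, hk, rfl⟩ := (PySem.List.mem_enumerate_iff replace 0 x).mp this
  exact List.getElem_mem hk

lemma live_add (replace : List (List (String × String))) (C : PySem.Set Int)
    (pre suf : List (Int × List (String × String))) (e : Int × List (String × String))
    (h : liveL replace C = pre ++ e :: suf) :
    liveL replace (PySem.Set.add C e.1) = pre ++ suf := by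
  have hpw := pairwise_live replace C
  rw [h, List.pairwise_append] at hpw
  obtain ⟨_, hsuf, hcross⟩ := hpw
  have hContains : ∀ x : Int, (PySem.Set.add C e.1).contains x = (C.contains x || x == e.1) := by
    intro x
    rw [Bool.eq_iff_iff, Bool.or_eq_true, PySem.Set.contains_iff, PySem.Set.contains_iff,
      PySem.Set.mem_add]
    simp
  have hstep : liveL replace (PySem.Set.add C e.1) =
      (liveL replace C).filter (fun x => !(x.1 == e.1)) := by
    unfold liveL
    rw [List.filter_filter]
    apply List.filter_congr
    intro x _
    rw [hContains x.1]
    cases C.contains x.1 <;> cases x.1 == e.1 <;> rfl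
  rw [hstep, h, List.filter_append, List.filter_cons]
  have hpre : pre.filter (fun x => !(x.1 == e.1)) = pre := by
    apply List.filter_eq_self.mpr
    intro a ha
    have : a.1 < e.1 := hcross a ha e (by simp)
    simp [this.ne]
  have hsu : suf.filter (fun x => !(x.1 == e.1)) = suf := by
    apply List.filter_eq_self.mpr
    intro a ha
    have : e.1 < a.1 := (List.pairwise_cons.mp hsuf).1 a ha
    simp [this.ne']
  simp [hpre, hsu]

-- ---- build lemma ----
lemma foldl_modify_getD (l : List (Int × List (String × String)))
    : ∀ (d : PySem.Dict (Option String × List (String × String)) (List (Int × List (String × String))))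
      (k : Option String × List (String × String)),
      (l.foldl (fun d jr => d.modify (clsB jr.2) [] (fun q => q ++ [jr])) d).getD k []
        = d.getD k [] ++ l.filter (fun p => decide (clsB p.2 = k)) := by
  induction l with
  | nil => intro d k; simp
  | cons x xs ih =>
    intro d k
    rw [List.foldl_cons, ih, PySem.Dict.getD_modify, List.filter_cons]
    by_cases hk : k = clsB x.2
    · simp [hk, List.append_assoc]
    · simp [hk, Ne.symm hk]

lemma buildQ_getD (repl : List (List (String × String))) (k : Option String × List (String × String)) :
    (buildQ repl).getD k [] = (PySem.List.enumerate repl).filter (fun p => decide (clsB p.2 = k)) := by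
  rw [buildQ, foldl_modify_getD, PySem.Dict.getD_empty]
  simp

-- ---- main loop invariant ----
lemma bloop_spec (replace : List (List (String × String))) (hr : ∀ d ∈ replace, nkeys d) :
    ∀ (os : List (List (String × String))) (C : PySem.Set Int)
      (queues : PySem.Dict (Option String × List (String × String)) (List (Int × List (String × String))))
      (res : List (List (String × String))),
      (∀ d ∈ os, nkeys d) →
      (∀ k, queues.getD k [] = (liveL replace C).filter (fun p => decide (clsB p.2 = k))) →
      (bloop os queues C res).1 = res ++ (refA os (liveL replace C)).1 ∧
      liveL replace (bloop os queues C res).2 = (refA os (liveL replace C)).2 := by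
  intro os
  induction os with
  | nil => intro C queues res _ _; exact ⟨by simp [bloop, refA], by simp [bloop, refA]⟩
  | cons o os ih =>
    intro C queues res hos hinv
    have ho : nkeys o := hos o (by simp)
    have hos' : ∀ d ∈ os, nkeys d := fun d hd => hos d (by simp [hd])
    have hq := hinv (clsB o)
    cases hh : ((queues.getD (clsB o) []).head?) with
    | none =>
      have hfil : (liveL replace C).filter (fun p => decide (clsB p.2 = clsB o)) = [] := by
        rw [← hq]
        exact List.head?_eq_none_iff.mp hh
      have hex : extractF (fun p => condA o p.2) (liveL replace C) = none := by
        apply extractF_none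
        intro x hx
        rw [cond_char ho (hr _ (mem_live_snd hx))]
        have := List.filter_eq_nil_iff.mp hfil x hx
        simpa using this
      obtain ⟨ha, hb⟩ := ih C queues (res ++ [o]) hos' hinv
      refine ⟨?_, ?_⟩
      · rw [bloop, hh, ha, refA, hex]
        simp
      · rw [bloop, hh, hb, refA, hex]
    | some jr =>
      obtain ⟨tl, hl⟩ : ∃ tl, queues.getD (clsB o) [] = jr :: tl := by
        cases hl : queues.getD (clsB o) [] with
        | nil => rw [hl] at hh; cases hh
        | cons a t =>
          rw [hl] at hh
          have : a = jr := by simpa using hh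
          exact ⟨t, by rw [this]⟩
      have hfe : (liveL replace C).filter (fun p => decide (clsB p.2 = clsB o)) = jr :: tl := by
        rw [← hq, hl]
      obtain ⟨pre, suf, hsplit, hpre, he, htail⟩ := filter_eq_cons_split _ _ _ _ hfe
      have hjrmem : jr ∈ liveL replace C := by rw [hsplit]; simp
      have hex : extractF (fun p => condA o p.2) (liveL replace C) = some (jr, pre ++ suf) := by
        rw [hsplit]
        apply extractF_of_split
        · intro x hx
          rw [cond_char ho (hr _ (mem_live_snd (x := x) (by rw [hsplit]; simp [hx])))]
          exact hpre x hx
        · rw [cond_char ho (hr _ (mem_live_snd hjrmem))]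
          exact he
      have hlive' : liveL replace (PySem.Set.add C jr.1) = pre ++ suf :=
        live_add replace C pre suf jr hsplit
      have hclsjr : clsB jr.2 = clsB o := by simpa using he
      have hinv' : ∀ k, (queues.insert (clsB o) (queues.getD (clsB o) []).tail).getD k []
          = (liveL replace (PySem.Set.add C jr.1)).filter (fun p => decide (clsB p.2 = k)) := by
        intro k
        rw [hlive', List.filter_append]
        by_cases hk : k = clsB o
        · rw [hk, PySem.Dict.getD_insert_self, hl]
          have hprefil : pre.filter (fun p => decide (clsB p.2 = clsB o)) = [] :=
            List.filter_eq_nil_iff.mpr (fun a ha => by simp [hpre a ha])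
          rw [hprefil]
          simpa using htail
        · rw [PySem.Dict.getD_insert_of_ne _ _ _ hk, hinv k, hsplit, List.filter_append,
            List.filter_cons]
          have : ¬ (decide (clsB jr.2 = k) = true) := by
            simp [hclsjr, Ne.symm hk]
          simp [this]
      obtain ⟨ha, hb⟩ := ih (PySem.Set.add C jr.1) _ (res ++ [jr.2]) hos' hinv'
      refine ⟨?_, ?_⟩
      · rw [bloop, hh, ha, hlive', refA, hex]
        simp
      · rw [bloop, hh, hb, hlive', refA, hex]

-- ===== VERDICT (by name: the statement is the Claim_ definition above) =====
theorem merge_env_list_spec : Claim_equal_merge_env_list := by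
  intro original replace _ hpre
  obtain ⟨hON, hRN⟩ := hpre
  unfold Spec_merge_env_list merge_env_list merge_env_list_alt
  have hlive0 : liveL replace PySem.Set.empty = PySem.List.enumerate replace := by
    unfold liveL
    apply List.filter_eq_self.mpr
    intro a _
    simp [PySem.Set.empty, PySem.Set.contains]
  obtain ⟨h1, h2⟩ := bloop_spec replace hRN original PySem.Set.empty (buildQ replace) [] hON
    (fun k => by rw [buildQ_getD, hlive0])
  have hA : outerA original replace
      = ((refA original (liveL replace PySem.Set.empty)).1,
         (refA original (liveL replace PySem.Set.empty)).2.map (fun x => x.2)) := by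
    have h := outerA_refA original (PySem.List.enumerate replace)
    rw [PySem.List.map_snd_enumerate] at h
    rw [hlive0]
    exact h
  show (outerA original replace).1 ++ (outerA original replace).2
      = (bloop original (buildQ replace) PySem.Set.empty []).1
        ++ (liveL replace (bloop original (buildQ replace) PySem.Set.empty []).2).map (fun x => x.2)
  rw [hA, h1, h2]
  simp
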